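-- pv_equiv track=rewrite | github.com/google/capirca | capirca/lib/arista_tp.py | _remove_duplicate_field_sets
-- ===== SOURCE A (Python) =====
-- def _remove_duplicate_field_sets(field_sets):
--   """Removes duplicate field-sets and maps duplicate names to the original names.
--
--   Args:
--     field_sets (dict): A dictionary where keys are field-set names and values
--                        are the field-set content as strings.
--
--   Returns:
--       tuple: A tuple containing:
--           - A list of unique field-set content.
--           - A dictionary mapping duplicate field-set names to original names.
--   Example:
--     If a policy has field-sets with identical prefixes, the function will
--     return only the unique field-sets.
--     !
--     field-set ipv6 prefix src-ipv6-term-1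
--       2001:4860:4860::8888/128
--       2001:4860:4860::8844/128
--     !
--     field-set ipv6 prefix src-ipv6-term-2
--       2001:4860:4860::8888/128
--       2001:4860:4860::8844/128
--     !
--     Result:
--     !
--     field-set ipv6 prefix src-ipv6-term-1
--       2001:4860:4860::8888/128
--       2001:4860:4860::8844/128
--     !
--   """
--
--   # Key: field-set name (str), Value: Set() of prefixes.
--   unique_field_sets = dict()
--   # Key: duplicate field-set name, Value: Existing field-set name.
--   field_sets_to_rename = dict()
--
--   for curr_name, field_set_pfxs in field_sets.items():
--     # Extract the prefixes from the field-set (lines excluding the header).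
--     current_prefixes = tuple(
--         line.strip() for line in field_set_pfxs.splitlines()[1:]
--     )
--
--     for existing_name, existing_prefixes in unique_field_sets.items():
--       if current_prefixes == existing_prefixes:
--         # Found a duplicate; Mark the field-set for reanming.
--         field_sets_to_rename[curr_name] = existing_name
--         break
--     else:
--       # No duplicate found; add to unique field-sets.
--       unique_field_sets[curr_name] = current_prefixes
--
--   return (
--       [field_sets[name] for name in unique_field_sets.keys()],
--       field_sets_to_rename,
--   )
-- ===== SOURCE B (Python) =====
-- def _remove_duplicate_field_sets(field_sets):
--   """Two-pass index-table version: first pass groups field-sets by their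
--   stripped-prefix content and records the first (representative) name per
--   content; second pass classifies every name against its representative."""
--   # Pass 1: content-key -> first name seen with that content.
--   rep_by_content = {}
--   for name, field_set_pfxs in field_sets.items():
--     key = tuple(line.strip() for line in field_set_pfxs.splitlines()[1:])
--     rep_by_content.setdefault(key, name)
--
--   # Pass 2: a name is unique iff it IS its content's representative.
--   unique_content = []
--   field_sets_to_rename = {}
--   for name, field_set_pfxs in field_sets.items():
--     key = tuple(line.strip() for line in field_set_pfxs.splitlines()[1:])
--     rep = rep_by_content[key]
--     if rep == name:
--       unique_content.append(field_set_pfxs)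
--     else:
--       field_sets_to_rename[name] = rep
--
--   return unique_content, field_sets_to_rename
-- ===== Notes on version B (the rewrite author's own statement) =====
-- stated objective: alternative
-- what changed: Replaces A's per-item inner scan over the accumulated unique field-sets with a content-keyed index table built in one pass, followed by a second pass that classifies each name by whether it is its content's representative.
import Mathlib
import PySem

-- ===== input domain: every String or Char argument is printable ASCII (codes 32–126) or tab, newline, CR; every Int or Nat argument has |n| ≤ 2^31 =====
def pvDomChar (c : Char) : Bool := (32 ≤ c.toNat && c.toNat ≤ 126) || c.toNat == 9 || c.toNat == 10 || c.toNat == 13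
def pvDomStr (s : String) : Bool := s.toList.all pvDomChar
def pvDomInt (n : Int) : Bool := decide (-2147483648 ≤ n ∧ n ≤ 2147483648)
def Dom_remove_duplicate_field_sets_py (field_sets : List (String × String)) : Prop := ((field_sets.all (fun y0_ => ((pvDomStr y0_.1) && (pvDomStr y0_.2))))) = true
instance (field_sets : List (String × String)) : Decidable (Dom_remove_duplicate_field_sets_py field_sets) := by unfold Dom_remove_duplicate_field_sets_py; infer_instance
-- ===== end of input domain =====

-- B replaces A's inner scan over the unique field-sets with a content-keyed index table
-- built in a first pass and consulted in a classifying second pass.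

-- shared helper: tuple(line.strip() for line in s.splitlines()[1:])  (identical expression in both Pythons)
def pvKey (s : String) : List String :=
  (PySem.List.slice (PySem.Str.splitlines s) (some 1) none).map PySem.Str.strip

-- ===== PORT A =====
-- the 'for existing_name, existing_prefixes in unique_field_sets.items(): … break / else' scan = first match over items
def pvALoop : List (String × String) → PySem.Dict String (List String) → PySem.Dict String String →
    PySem.Dict String (List String) × PySem.Dict String String
  | [], u, r => (u, r)
  | e :: t, u, r =>
    let p := pvKey e.2
    match u.items.find? (fun x => x.2 == p) with
    | some w => pvALoop t u (r.insert e.1 w.1)   -- duplicate: field_sets_to_rename[curr_name] = existing_name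
    | none   => pvALoop t (u.insert e.1 p) r     -- unique: unique_field_sets[curr_name] = current_prefixes

def remove_duplicate_field_sets_py (field_sets : List (String × String)) : List String × (List (String × String)) :=
  let ur := pvALoop field_sets .empty .empty
  -- field_sets[name]: dict lookup = first match; the name always comes from field_sets, so the default is unreachable
  (ur.1.keys.map (fun n => ((field_sets.find? (fun x => x.1 == n)).map (·.2)).getD ""), ur.2.items)

-- ===== PORT B =====
-- pass 1: rep_by_content.setdefault(key, name)
def pvRep (field_sets : List (String × String)) : PySem.Dict (List String) String :=
  field_sets.foldl (fun d e => d.setdefault (pvKey e.2) e.1) .empty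

-- pass 2 body: rep = rep_by_content[key] (always present: inserted in pass 1, so the default is unreachable)
def pvBStep (rep : PySem.Dict (List String) String) (acc : List String × PySem.Dict String String)
    (e : String × String) : List String × PySem.Dict String String :=
  let rn := rep.getD (pvKey e.2) ""
  if rn == e.1 then (acc.1 ++ [e.2], acc.2) else (acc.1, acc.2.insert e.1 rn)

def remove_duplicate_field_sets_py_alt (field_sets : List (String × String)) : List String × (List (String × String)) :=
  let rep := pvRep field_sets
  let ur := field_sets.foldl (pvBStep rep) ([], .empty)
  (ur.1, ur.2.items)

-- ===== PRECONDITION & SPEC =====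
-- Pre_ excludes only association lists with duplicate keys: a Python dict (A's declared argument
-- type) always has distinct keys, so no actual input of A is excluded.
def Pre_remove_duplicate_field_sets_py (field_sets : List (String × String)) : Prop :=
  (field_sets.map Prod.fst).Nodup
instance (field_sets : List (String × String)) : Decidable (Pre_remove_duplicate_field_sets_py field_sets) := by unfold Pre_remove_duplicate_field_sets_py; infer_instance

def pvWitness_remove_duplicate_field_sets_py : (List (String × String)) :=
  [("s1", "hdr\n 10.0.0.0/8\n 10.1.0.0/16"), ("s2", "hdr\n10.0.0.0/8\n10.1.0.0/16"), ("s3", "hdr\n 10.2.0.0/16")]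

def Spec_remove_duplicate_field_sets_py (field_sets : List (String × String)) (out : List String × (List (String × String))) : Prop := out = remove_duplicate_field_sets_py_alt field_sets
instance (field_sets : List (String × String)) (out : List String × (List (String × String))) : Decidable (Spec_remove_duplicate_field_sets_py field_sets out) := by unfold Spec_remove_duplicate_field_sets_py; infer_instance

-- ===== CLAIM (what is proved, stated in full; the proofs are below) =====
def Claim_equal_remove_duplicate_field_sets_py : Prop := ∀ (field_sets : List (String × String)), Dom_remove_duplicate_field_sets_py field_sets → Pre_remove_duplicate_field_sets_py field_sets → Spec_remove_duplicate_field_sets_py field_sets (remove_duplicate_field_sets_py field_sets)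

-- ===== LEMMAS AND PROOFS =====

-- first-match lookup in a duplicate-free association list finds the element's own value
lemma pv_find_lookup (l : List (String × String)) (e : String × String)
    (hnd : (l.map Prod.fst).Nodup) (he : e ∈ l) :
    ((l.find? (fun x => x.1 == e.1)).map (·.2)).getD "" = e.2 := by
  induction l with
  | nil => cases he
  | cons a t ih =>
    simp only [List.map_cons, List.nodup_cons] at hnd
    rcases List.mem_cons.1 he with rfl | ht
    · simp [List.find?_cons_of_pos]
    · have hne : (a.1 == e.1) = false := by
        refine beq_eq_false_iff_ne.2 ?_
        intro h
        exact hnd.1 (h ▸ List.mem_map_of_mem ht)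
      rw [List.find?_cons_of_neg (by simp [hne])]
      exact ih hnd.2 ht

-- the index table of pass 1: lookup gives the FIRST name in the list with that content
lemma pvRep_get? (k : List String) :
    ∀ (l : List (String × String)) (d : PySem.Dict (List String) String),
    (l.foldl (fun d e => d.setdefault (pvKey e.2) e.1) d).get? k =
      match d.get? k with
      | some v => some v
      | none => (l.find? (fun y => pvKey y.2 == k)).map (·.1) := by
  intro l
  induction l with
  | nil => intro d; cases h : d.get? k <;> simp [h]
  | cons e t ih =>
    intro d
    simp only [List.foldl_cons]
    rw [ih]
    by_cases hc : d.contains (pvKey e.2) = true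
    · rw [PySem.Dict.setdefault_of_contains _ _ hc]
      cases h : d.get? k with
      | some v => simp
      | none =>
        have hke : ((pvKey e.2 : List String) == k) = false := by
          refine beq_eq_false_iff_ne.2 ?_
          intro hb
          rw [PySem.Dict.contains_eq_isSome_get?, hb, h] at hc
          simp at hc
        simp [hke]
    · rw [PySem.Dict.setdefault_of_not_contains _ _ (by simpa using hc)]
      by_cases hk : k = pvKey e.2
      · rw [hk]
        have hd : d.get? (pvKey e.2) = none := by
          rw [PySem.Dict.contains_eq_isSome_get?] at hc
          cases h : d.get? (pvKey e.2) with
          | none => rfl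
          | some v => rw [h] at hc; simp at hc
        rw [PySem.Dict.get?_insert_self, hd]
        simp
      · rw [PySem.Dict.get?_insert_of_ne _ _ hk]
        cases h : d.get? k with
        | some v => simp
        | none =>
          have hke : ((pvKey e.2 : List String) == k) = false :=
            beq_eq_false_iff_ne.2 (fun hb => hk hb.symm)
          simp [hke]

-- main simultaneous-loop invariant: A's scan loop agrees with B's classifying pass
lemma pv_main (fs : List (String × String)) :
    ∀ (t : List (String × String)) (u : PySem.Dict String (List String))
      (r : PySem.Dict String String) (uc : List String) (ren : PySem.Dict String String),
    (∀ k, u.items.find? (fun x => x.2 == k) = none →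
        (pvRep fs).get? k = (t.find? (fun y => pvKey y.2 == k)).map (·.1)) →
    (∀ k w, u.items.find? (fun x => x.2 == k) = some w → (pvRep fs).get? k = some w.1) →
    (t.map Prod.fst).Nodup →
    (∀ e ∈ t, e.1 ∉ u.keys) →
    r = ren →
    u.keys.map (fun n => ((fs.find? (fun x => x.1 == n)).map (·.2)).getD "") = uc →
    (∀ e ∈ t, ((fs.find? (fun x => x.1 == e.1)).map (·.2)).getD "" = e.2) →
    ((pvALoop t u r).1.keys.map (fun n => ((fs.find? (fun x => x.1 == n)).map (·.2)).getD ""),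
      (pvALoop t u r).2) = t.foldl (pvBStep (pvRep fs)) (uc, ren) := by
  intro t
  induction t with
  | nil =>
    intro u r uc ren _ _ _ _ h5 huc _
    simp [pvALoop, h5, huc]
  | cons e t ih =>
    intro u r uc ren h2 h3 hnd hfresh h5 huc h6
    simp only [List.map_cons, List.nodup_cons] at hnd
    simp only [List.foldl_cons]
    cases hfind : u.items.find? (fun x => x.2 == pvKey e.2) with
    | some w =>
      -- A: duplicate branch; B: rep ≠ name branch
      have hrep : (pvRep fs).get? (pvKey e.2) = some w.1 := h3 _ _ hfind
      have hwmem : w ∈ u.items := List.mem_of_find?_eq_some hfind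
      have hwkeys : w.1 ∈ u.keys := by
        simpa [PySem.Dict.keys] using List.mem_map_of_mem (f := Prod.fst) hwmem
      have hne : (w.1 == e.1) = false := by
        refine beq_eq_false_iff_ne.2 ?_
        intro h
        exact hfresh e (List.mem_cons_self) (h ▸ hwkeys)
      have hB : pvBStep (pvRep fs) (uc, ren) e = (uc, ren.insert e.1 w.1) := by
        simp [pvBStep, PySem.Dict.getD_eq_get?_getD, hrep, hne]
      rw [hB]
      simp only [pvALoop, hfind]
      exact ih u (r.insert e.1 w.1) uc (ren.insert e.1 w.1)
        (by intro k hk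
            have hke : ((pvKey e.2 : List String) == k) = false := by
              refine beq_eq_false_iff_ne.2 ?_
              intro hb
              rw [hb] at hfind
              rw [hk] at hfind
              cases hfind
            rw [h2 k hk]
            simp [hke])
        h3 hnd.2 (fun x hx => hfresh x (List.mem_cons_of_mem _ hx)) (by rw [h5]) huc
        (fun x hx => h6 x (List.mem_cons_of_mem _ hx))
    | none =>
      -- A: unique branch; B: rep == name branch
      have hrep : (pvRep fs).get? (pvKey e.2) = some e.1 := by
        rw [h2 _ hfind]
        simp
      have hB : pvBStep (pvRep fs) (uc, ren) e = (uc ++ [e.2], ren) := by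
        simp [pvBStep, PySem.Dict.getD_eq_get?_getD, hrep]
      rw [hB]
      simp only [pvALoop, hfind]
      have hcontains : u.contains e.1 = false := by
        rw [Bool.eq_false_iff]
        intro hc
        exact hfresh e List.mem_cons_self ((PySem.Dict.contains_iff_mem_keys _ _).1 hc)
      have hitems : (u.insert e.1 (pvKey e.2)).items = u.items ++ [(e.1, pvKey e.2)] :=
        PySem.Dict.items_insert_of_not_contains _ _ hcontains
      have hkeys : (u.insert e.1 (pvKey e.2)).keys = u.keys ++ [e.1] := by
        simp [PySem.Dict.keys, hitems]
      exact ih (u.insert e.1 (pvKey e.2)) r (uc ++ [e.2]) ren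
        (by intro k hk
            rw [hitems, List.find?_append] at hk
            rcases Option.or_eq_none_iff.mp hk with ⟨hk1, hk2⟩
            rw [List.find?_singleton] at hk2
            have hke : ((pvKey e.2 : List String) == k) = false := by
              refine beq_eq_false_iff_ne.2 ?_
              intro hb
              simp [hb] at hk2
            rw [h2 k hk1]
            simp [hke])
        (by intro k w hw
            rw [hitems, List.find?_append] at hw
            cases hk1 : u.items.find? (fun x => x.2 == k) with
            | some w' =>
              rw [hk1, Option.some_or] at hw
              injection hw with hww
              rw [← hww]
              exact h3 k w' hk1
            | none =>
              rw [hk1, Option.none_or, List.find?_singleton] at hw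
              by_cases hb : ((pvKey e.2 : List String) == k) = true
              · rw [if_pos (by simpa using hb)] at hw
                cases hw
                rw [← beq_iff_eq.1 hb, hrep]
              · rw [if_neg (by simpa using hb)] at hw
                cases hw)
        hnd.2
        (by intro x hx
            rw [hkeys]
            intro hmem
            rcases List.mem_append.1 hmem with h | h
            · exact hfresh x (List.mem_cons_of_mem _ hx) h
            · simp at h
              exact hnd.1 (h ▸ List.mem_map_of_mem hx))
        h5
        (by rw [hkeys, List.map_append, huc, List.map_singleton, h6 e List.mem_cons_self])
        (fun x hx => h6 x (List.mem_cons_of_mem _ hx))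

-- ===== VERDICT (by name: the statement is the Claim_ definition above) =====
theorem remove_duplicate_field_sets_py_spec : Claim_equal_remove_duplicate_field_sets_py := by
  intro fs _ hpre
  unfold Spec_remove_duplicate_field_sets_py remove_duplicate_field_sets_py remove_duplicate_field_sets_py_alt
  have h := pv_main fs fs .empty .empty [] .empty
    (by intro k _
        show (pvRep fs).get? k = _
        unfold pvRep
        rw [pvRep_get? k fs .empty]
        simp [PySem.Dict.get?_empty])
    (by intro k w hw; simp [PySem.Dict.empty] at hw)
    hpre
    (by intro e _; simp [PySem.Dict.keys, PySem.Dict.empty])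
    rfl
    (by simp [PySem.Dict.keys, PySem.Dict.empty])
    (fun e he => pv_find_lookup fs e hpre he)
  have h1 := congrArg Prod.fst h
  have h2 := congrArg (fun p => (p.2 : PySem.Dict String String).items) h
  simp only at h1 h2
  exact Prod.ext h1 h2
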